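-- pv_equiv track=rewrite | github.com/DDAramis/my-coding-challenges | python/problem-5/MaxConsecutiveRepeats.py | max_consecutive_numbers
-- ===== SOURCE A (Python) =====
-- def max_consecutive_numbers(numbers):
--     if not numbers:
--         return 0
--     elif len(numbers) == 1:
--         return 1
--
--     count = 1
--     max_repeats = 1
--     previous = numbers[0]
--
--     for number in numbers[1:]:
--         if number == previous:
--             count += 1
--         else:
--             count = 1
--         max_repeats = max(max_repeats, count)
--         previous = number
--     return max_repeats
-- ===== SOURCE B (Python) =====
-- def max_consecutive_numbers(numbers):
--     # Segment the list into maximal runs of equal values, collect run lengths,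
--     # then take the maximum (0 for the empty list).
--     runs = []
--     i = 0
--     n = len(numbers)
--     while i < n:
--         j = i + 1
--         while j < n and numbers[j] == numbers[i]:
--             j += 1
--         runs.append(j - i)
--         i = j
--     return max(runs, default=0)
-- ===== Notes on version B (the rewrite author's own statement) =====
-- stated objective: alternative
-- what changed: B segments the list into maximal runs of equal values and returns the maximum run length (default 0), replacing A's single-pass count/previous/max_repeats bookkeeping and its two early-return special cases.
import Mathlib
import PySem

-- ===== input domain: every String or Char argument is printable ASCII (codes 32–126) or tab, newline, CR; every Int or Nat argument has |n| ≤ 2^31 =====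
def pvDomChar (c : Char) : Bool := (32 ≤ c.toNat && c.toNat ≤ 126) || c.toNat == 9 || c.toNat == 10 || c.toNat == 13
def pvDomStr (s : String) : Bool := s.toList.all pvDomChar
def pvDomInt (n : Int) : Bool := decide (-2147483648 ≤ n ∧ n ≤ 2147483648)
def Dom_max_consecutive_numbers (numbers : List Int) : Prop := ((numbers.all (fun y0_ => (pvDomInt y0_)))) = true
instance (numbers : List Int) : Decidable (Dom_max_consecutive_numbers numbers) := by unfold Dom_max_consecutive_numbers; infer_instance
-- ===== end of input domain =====

-- B segments the list into maximal runs of equal values and takes the maximum run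
-- length (0 for the empty list); a genuinely different decomposition of the same task.

-- ===== PORT A =====
-- literal transliteration of A: early returns for [] and singleton, then a fold over
-- numbers[1:] carrying (count, max_repeats, previous).
def max_consecutive_numbers (numbers : List Int) : Int :=
  match numbers with
  | [] => 0
  | x :: xs =>
    if xs = [] then 1
    else
      let s := xs.foldl
        (fun (st : Int × Int × Int) number =>
          let count := if number = st.2.2 then st.1 + 1 else 1
          (count, max st.2.1 count, number))
        (1, 1, x)
      s.2.1

-- ===== PORT B =====
-- outer loop of Source B: one maximal run (the inner `while` scan = takeWhile) per step,
-- collecting the run lengths.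
def pvRuns (numbers : List Int) : List Int :=
  match numbers with
  | [] => []
  | x :: xs =>
    (1 + ((xs.takeWhile (· == x)).length : Int)) :: pvRuns (xs.dropWhile (· == x))
termination_by numbers.length
decreasing_by
  simp only [List.length_cons]
  exact Nat.lt_succ_of_le (xs.length_dropWhile_le _)

-- max(runs, default=0)
def max_consecutive_numbers_alt (numbers : List Int) : Int :=
  (pvRuns numbers).foldl (fun a r => max a r) 0

-- ===== PRECONDITION & SPEC =====
def Spec_max_consecutive_numbers (numbers : List Int) (out : Int) : Prop := out = max_consecutive_numbers_alt numbers
instance (numbers : List Int) (out : Int) : Decidable (Spec_max_consecutive_numbers numbers out) := by unfold Spec_max_consecutive_numbers; infer_instance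

-- ===== CLAIM (what is proved, stated in full; the proofs are below) =====
def Claim_equal_max_consecutive_numbers : Prop := ∀ (numbers : List Int), Dom_max_consecutive_numbers numbers → Spec_max_consecutive_numbers numbers (max_consecutive_numbers numbers)

-- ===== LEMMAS AND PROOFS =====

-- A's loop, written as structural recursion on the remaining input.
def pvLoop (p c m : Int) : List Int → Int
  | [] => m
  | x :: xs =>
    if x = p then pvLoop x (c + 1) (max m (c + 1)) xs
    else pvLoop x 1 (max m 1) xs

lemma foldl_eq_pvLoop (xs : List Int) (c m p : Int) :
    (xs.foldl
      (fun (st : Int × Int × Int) number =>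
        let count := if number = st.2.2 then st.1 + 1 else 1
        (count, max st.2.1 count, number))
      (c, m, p)).2.1 = pvLoop p c m xs := by
  induction xs generalizing c m p with
  | nil => rfl
  | cons x xs ih =>
    simp only [List.foldl_cons, pvLoop]
    split_ifs with h <;> simp [h, ih]

-- "best final run length": max run length of xs seen as continuing a run of p of length c.
def pvF (p c : Int) : List Int → Int
  | [] => c
  | x :: xs => if x = p then pvF p (c + 1) xs else max c (pvF x 1 xs)

lemma le_pvF (xs : List Int) (p c : Int) : c ≤ pvF p c xs := by
  induction xs generalizing p c with
  | nil => simp [pvF]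
  | cons x xs ih =>
    simp only [pvF]
    split_ifs with h
    · have := ih p (c + 1); omega
    · exact le_max_left _ _

lemma pvLoop_eq_max_pvF (xs : List Int) (p c m : Int) (h1 : 1 ≤ c) (h2 : c ≤ m) :
    pvLoop p c m xs = max m (pvF p c xs) := by
  induction xs generalizing p c m with
  | nil => simp only [pvLoop, pvF]; exact (max_eq_left h2).symm
  | cons x xs ih =>
    simp only [pvLoop, pvF]
    split_ifs with h
    · subst h
      rw [ih x (c + 1) (max m (c + 1)) (by omega) (le_max_right _ _)]
      have := le_pvF xs x (c + 1)
      omega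
    · rw [ih x 1 (max m 1) (by omega) (le_max_right _ _)]
      have := le_pvF xs x 1
      omega

lemma foldl_max_eq (rs : List Int) (a : Int) (ha : 0 ≤ a) :
    rs.foldl (fun a r => max a r) a = max a (rs.foldl (fun a r => max a r) 0) := by
  induction rs generalizing a with
  | nil => simp; omega
  | cons r rs ih =>
    simp only [List.foldl_cons]
    rw [ih (max a r) (by omega), ih (max 0 r) (by omega)]
    omega

lemma pvF_eq_runs (xs : List Int) (p c : Int) (hc : 0 ≤ c) :
    pvF p c xs =
      max (c + ((xs.takeWhile (· == p)).length : Int))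
        ((pvRuns (xs.dropWhile (· == p))).foldl (fun a r => max a r) 0) := by
  induction xs generalizing p c with
  | nil =>
    simp only [pvF, List.takeWhile_nil, List.dropWhile_nil, pvRuns, List.length_nil,
      List.foldl_nil]
    omega
  | cons x xs ih =>
    simp only [pvF]
    split_ifs with h
    · subst h
      rw [ih x (c + 1) (by omega)]
      simp only [List.takeWhile_cons, List.dropWhile_cons, beq_self_eq_true, if_true,
        List.length_cons]
      push_cast
      omega
    · have hb : (x == p) = false := by simp [h]
      simp only [List.takeWhile_cons, List.dropWhile_cons, hb, if_false, Bool.false_eq_true,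
        List.length_nil]
      rw [ih x 1 (by omega)]
      conv_rhs => rw [pvRuns]
      simp only [List.foldl_cons]
      rw [foldl_max_eq _ (max 0 _) (by omega)]
      have h1 : (0:Int) ≤ ((xs.takeWhile (· == x)).length : Int) := by positivity
      omega

lemma alt_eq_pvF (x : Int) (xs : List Int) :
    max_consecutive_numbers_alt (x :: xs) = pvF x 1 xs := by
  unfold max_consecutive_numbers_alt
  rw [pvRuns, List.foldl_cons, foldl_max_eq _ _ (by positivity),
    pvF_eq_runs xs x 1 (by omega)]
  have h1 : (0:Int) ≤ ((xs.takeWhile (· == x)).length : Int) := by positivity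
  omega

-- ===== VERDICT (by name: the statement is the Claim_ definition above) =====
theorem max_consecutive_numbers_spec : Claim_equal_max_consecutive_numbers := by
  intro numbers _
  unfold Spec_max_consecutive_numbers
  match numbers with
  | [] => simp [max_consecutive_numbers, max_consecutive_numbers_alt, pvRuns]
  | x :: xs =>
    rw [alt_eq_pvF]
    have hA : max_consecutive_numbers (x :: xs) =
        (if xs = [] then (1 : Int)
         else
           (xs.foldl
             (fun (st : Int × Int × Int) number =>
               let count := if number = st.2.2 then st.1 + 1 else 1
               (count, max st.2.1 count, number))
             (1, 1, x)).2.1) := rfl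
    rw [hA]
    split_ifs with h
    · subst h
      simp [pvF]
    · simp only
      rw [foldl_eq_pvLoop, pvLoop_eq_max_pvF xs x 1 1 le_rfl le_rfl]
      have := le_pvF xs x 1
      omega
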